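-- pv_equiv track=rewrite | github.com/Toaderz/EXCEL_ANALYZER | excel_analyzer/_core.py | _rango_contiguo_mayor
-- ===== SOURCE A (Python) =====
-- def _rango_contiguo_mayor(indices: list[int]) -> list[int]:
--     """Dado una lista de índices, retorna el sub-rango contiguo más largo."""
--     if not indices:
--         return []
--     mejor_inicio = 0
--     mejor_largo  = 1
--     inicio_actual = 0
--     for i in range(1, len(indices)):
--         if indices[i] == indices[i - 1] + 1:
--             largo = i - inicio_actual + 1
--             if largo > mejor_largo:
--                 mejor_largo  = largo
--                 mejor_inicio = inicio_actual
--         else: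
--             inicio_actual = i
--     return indices[mejor_inicio : mejor_inicio + mejor_largo]
-- ===== SOURCE B (Python) =====
-- def _rango_contiguo_mayor(indices: list[int]) -> list[int]:
--     """Dado una lista de índices, retorna el sub-rango contiguo más largo."""
--     mejor = []
--     n = len(indices)
--     k = 0
--     while k < n:
--         j = k + 1
--         while j < n and indices[j] == indices[j - 1] + 1:
--             j += 1
--         if len(mejor) < j - k:
--             mejor = indices[k:j]
--         k = j
--     return mejor
-- ===== Notes on version B (the rewrite author's own statement) =====
-- stated objective: alternative
-- what changed: B segments the list into maximal consecutive runs with an explicit run-boundary scan and keeps the first longest run as a slice, instead of A's single indexed loop maintaining best-start/best-length/current-start counters.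
import Mathlib
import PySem

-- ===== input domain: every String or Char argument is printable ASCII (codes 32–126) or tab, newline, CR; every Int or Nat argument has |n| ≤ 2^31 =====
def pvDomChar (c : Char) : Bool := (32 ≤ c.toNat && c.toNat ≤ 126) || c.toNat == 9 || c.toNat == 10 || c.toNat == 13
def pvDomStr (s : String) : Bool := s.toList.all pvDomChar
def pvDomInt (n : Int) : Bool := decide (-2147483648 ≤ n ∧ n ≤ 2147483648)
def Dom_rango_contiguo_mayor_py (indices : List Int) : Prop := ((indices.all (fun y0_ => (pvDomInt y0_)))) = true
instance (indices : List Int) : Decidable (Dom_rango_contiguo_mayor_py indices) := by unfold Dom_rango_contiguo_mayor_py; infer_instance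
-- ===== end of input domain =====

-- B segments the list into maximal consecutive runs and keeps the first longest run,
-- instead of A's incremental best-start/best-length/current-start scan; same O(n), alternative structure.

-- ===== PORT A =====
-- loop body of A's 'for i in range(1, len(indices))'; state = (mejor_inicio, mejor_largo, inicio_actual)
def stepA (xs : List Int) (s : Int × Int × Int) (i : Int) : Int × Int × Int :=
  if PySem.List.pyGetD xs i 0 = PySem.List.pyGetD xs (i - 1) 0 + 1 then
    let largo := i - s.2.2 + 1
    if s.2.1 < largo then (s.2.2, largo, s.2.2) else s
  else (s.1, s.2.1, i)

def rango_contiguo_mayor_py (indices : List Int) : List Int :=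
  if indices = [] then []
  else
    let s := (PySem.List.pyRange 1 (indices.length) 1).foldl (stepA indices) (0, 1, 0)
    PySem.List.slice indices (some s.1) (some (s.1 + s.2.1))

-- ===== PORT B =====
-- inner 'while j < n and indices[j] == indices[j-1] + 1: j += 1'
def altScan (xs : List Int) (j : Nat) : Nat :=
  if j < xs.length ∧ PySem.List.pyGetD xs (j : Int) 0 = PySem.List.pyGetD xs ((j : Int) - 1) 0 + 1
  then altScan xs (j + 1) else j
termination_by xs.length - j
decreasing_by omega

-- cited by altLoop's decreasing_by (termination of the outer while)
theorem altScan_ge (xs : List Int) (j : Nat) : j ≤ altScan xs j := by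
  fun_induction altScan xs j with
  | case1 j h ih => omega
  | case2 j h => omega

-- outer 'while k < n' keeping the first longest run in 'mejor'
def altLoop (xs : List Int) (k : Nat) (mejor : List Int) : List Int :=
  if k < xs.length then
    let j := altScan xs (k + 1)
    altLoop xs j (if mejor.length < j - k then PySem.List.slice xs (some (k : Int)) (some (j : Int)) else mejor)
  else mejor
termination_by xs.length - k
decreasing_by have := altScan_ge xs (k + 1); omega

def rango_contiguo_mayor_py_alt (indices : List Int) : List Int :=
  altLoop indices 0 []

-- ===== PRECONDITION & SPEC =====
def Spec_rango_contiguo_mayor_py (indices : List Int) (out : List Int) : Prop := out = rango_contiguo_mayor_py_alt indices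
instance (indices : List Int) (out : List Int) : Decidable (Spec_rango_contiguo_mayor_py indices out) := by unfold Spec_rango_contiguo_mayor_py; infer_instance

-- ===== CLAIM (what is proved, stated in full; the proofs are below) =====
def Claim_equal_rango_contiguo_mayor_py : Prop := ∀ (indices : List Int), Dom_rango_contiguo_mayor_py indices → Spec_rango_contiguo_mayor_py indices (rango_contiguo_mayor_py indices)

-- ===== LEMMAS AND PROOFS =====

theorem altScan_le (xs : List Int) (j : Nat) (h : j ≤ xs.length) : altScan xs j ≤ xs.length := by
  fun_induction altScan xs j with
  | case1 j h' ih => exact ih (by omega)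
  | case2 j h' => exact h

-- inside the scanned run the consecutive-by-1 chain condition holds
theorem altScan_chain (xs : List Int) (j i : Nat) (hji : j ≤ i) (hi : i < altScan xs j) :
    PySem.List.pyGetD xs (i : Int) 0 = PySem.List.pyGetD xs ((i : Int) - 1) 0 + 1 := by
  fun_induction altScan xs j with
  | case1 j h ih =>
      rcases Nat.eq_or_lt_of_le hji with rfl | hlt
      · exact h.2
      · exact ih (by omega) hi
  | case2 j h => omega

-- at the position where the scan stops (if in range) the chain condition fails
theorem altScan_stop (xs : List Int) (j : Nat) (h : altScan xs j < xs.length) :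
    ¬ (PySem.List.pyGetD xs (altScan xs j : Int) 0 = PySem.List.pyGetD xs ((altScan xs j : Int) - 1) 0 + 1) := by
  fun_induction altScan xs j with
  | case1 j h' ih => exact ih h
  | case2 j h' =>
      intro hc
      exact h' ⟨h, hc⟩

-- A's fold over one maximal run of k chain steps starting at current-run start a
theorem stepA_chain (xs : List Int) (mb ml cur i : Int)
    (hc : PySem.List.pyGetD xs i 0 = PySem.List.pyGetD xs (i - 1) 0 + 1) :
    stepA xs (mb, ml, cur) i
      = if ml < i - cur + 1 then (cur, i - cur + 1, cur) else (mb, ml, cur) := by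
  simp [stepA, hc]

theorem stepA_break (xs : List Int) (mb ml cur i : Int)
    (hc : ¬ (PySem.List.pyGetD xs i 0 = PySem.List.pyGetD xs (i - 1) 0 + 1)) :
    stepA xs (mb, ml, cur) i = (mb, ml, i) := by
  simp [stepA, hc]

theorem chainFold (xs : List Int) (a mb ml : Int) (k : Nat) (hml : 1 ≤ ml)
    (hch : ∀ j : Nat, 1 ≤ j → j ≤ k → PySem.List.pyGetD xs (a + j) 0 = PySem.List.pyGetD xs (a + j - 1) 0 + 1) :
    (PySem.List.pyRange (a + 1) (a + 1 + (k : Int)) 1).foldl (stepA xs) (mb, ml, a)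
      = if ml < (k : Int) + 1 then (a, (k : Int) + 1, a) else (mb, ml, a) := by
  induction k with
  | zero =>
      rw [PySem.List.pyRange_one_eq_nil (by omega)]
      simp
      omega
  | succ k ih =>
      have h0 : (a : Int) + 1 ≤ a + 1 + (k : Int) := by omega
      push_cast
      rw [show a + 1 + ((k : Int) + 1) = a + 1 + (k : Int) + 1 by ring,
        PySem.List.pyRange_one_succ_right h0, List.foldl_append,
        ih (fun j h1 h2 => hch j h1 (by omega))]
      have hc : PySem.List.pyGetD xs (a + 1 + (k : Int)) 0
          = PySem.List.pyGetD xs (a + 1 + (k : Int) - 1) 0 + 1 := by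
        have h' := hch (k + 1) (by omega) (by omega)
        push_cast at h'
        rw [show a + 1 + (k : Int) = a + ((k : Int) + 1) by ring]
        exact h'
      have e2 : (k : Int) + 1 + 1 = (k : Int) + 2 := by ring
      by_cases h1 : ml < (k : Int) + 1
      · rw [if_pos h1, List.foldl_cons, List.foldl_nil, stepA_chain xs _ _ _ _ hc,
          show (a : Int) + 1 + k - a + 1 = (k : Int) + 2 by ring,
          if_pos (by omega : (k : Int) + 1 < (k : Int) + 2), if_pos (by omega : ml < (k : Int) + 1 + 1), e2]
      · rw [if_neg h1, List.foldl_cons, List.foldl_nil, stepA_chain xs _ _ _ _ hc,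
          show (a : Int) + 1 + k - a + 1 = (k : Int) + 2 by ring]
        by_cases h2 : ml < (k : Int) + 2
        · rw [if_pos h2, if_pos (by omega : ml < (k : Int) + 1 + 1), e2]
        · rw [if_neg h2, if_neg (by omega : ¬ ml < (k : Int) + 1 + 1)]

-- main alignment: from any run boundary a, A's remaining fold and B's remaining loop agree
theorem main_align (n : Nat) : ∀ (xs : List Int) (a : Nat) (mb ml : Int) (b : List Int),
    a ≤ xs.length → xs.length - a ≤ n → 0 ≤ mb → 1 ≤ ml →
    b = PySem.List.slice xs (some mb) (some (mb + ml)) → (b.length : Int) = ml →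
    ∀ s : Int × Int × Int,
      s = (PySem.List.pyRange ((a : Int) + 1) (xs.length) 1).foldl (stepA xs) (mb, ml, (a : Int)) →
      PySem.List.slice xs (some s.1) (some (s.1 + s.2.1)) = altLoop xs a b := by
  induction n with
  | zero =>
      intro xs a mb ml b ha hn h0 h1 hb hl s hs
      have haeq : a = xs.length := by omega
      rw [PySem.List.pyRange_one_eq_nil (by omega), List.foldl_nil] at hs
      subst hs
      rw [altLoop, if_neg (by omega)]
      exact hb.symm
  | succ n ih =>
      intro xs a mb ml b ha hn h0 h1 hb hl s hs
      by_cases hacase : a < xs.length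
      · have hj1 : a + 1 ≤ altScan xs (a + 1) := altScan_ge xs (a + 1)
        have hjle : altScan xs (a + 1) ≤ xs.length := altScan_le xs (a + 1) (by omega)
        obtain ⟨k, hk⟩ : ∃ k : Nat, altScan xs (a + 1) = a + 1 + k := ⟨altScan xs (a + 1) - (a + 1), by omega⟩
        have hch : ∀ j : Nat, 1 ≤ j → j ≤ k →
            PySem.List.pyGetD xs ((a : Int) + j) 0 = PySem.List.pyGetD xs ((a : Int) + j - 1) 0 + 1 := by
          intro j hja hjb
          have h := altScan_chain xs (a + 1) (a + j) (by omega) (by omega)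
          push_cast at h
          exact h
        rw [PySem.List.pyRange_one_append ((a : Int) + 1) ((a : Int) + 1 + (k : Int)) (xs.length)
              (by omega) (by omega),
            List.foldl_append, chainFold xs (a : Int) mb ml k h1 hch] at hs
        rw [altLoop, if_pos hacase]
        show PySem.List.slice xs (some s.1) (some (s.1 + s.2.1))
          = altLoop xs (altScan xs (a + 1))
              (if b.length < altScan xs (a + 1) - a
                then PySem.List.slice xs (some (a : Int)) (some ((altScan xs (a + 1)) : Int)) else b)
        have hlenrun : ((PySem.List.slice xs (some (a : Int)) (some ((altScan xs (a + 1)) : Int))).length : Int)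
            = (k : Int) + 1 := by
          rw [PySem.List.length_slice, PySem.List.clampIdx_natCast, PySem.List.clampIdx_natCast]
          omega
        have hstop : altScan xs (a + 1) < xs.length →
            ¬ (PySem.List.pyGetD xs ((a : Int) + 1 + (k : Int)) 0
               = PySem.List.pyGetD xs ((a : Int) + 1 + (k : Int) - 1) 0 + 1) := by
          intro hlt hc
          refine altScan_stop xs (a + 1) hlt ?_
          have : ((altScan xs (a + 1) : Nat) : Int) = (a : Int) + 1 + (k : Int) := by push_cast [hk]; ring_nf
          rw [this]
          exact hc
        by_cases hbest : ml < (k : Int) + 1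
        · rw [if_pos hbest] at hs
          have hb' : (if b.length < altScan xs (a + 1) - a
                then PySem.List.slice xs (some (a : Int)) (some ((altScan xs (a + 1)) : Int)) else b)
              = PySem.List.slice xs (some (a : Int)) (some ((altScan xs (a + 1)) : Int)) := by
            rw [if_pos (by omega)]
          rw [hb']
          rcases Nat.eq_or_lt_of_le hjle with heq | hlt
          · rw [show (a : Int) + 1 + (k : Int) = ((xs.length : Nat) : Int) by push_cast [← heq, hk]; ring,
              PySem.List.pyRange_one_eq_nil (by omega), List.foldl_nil] at hs
            subst hs
            rw [altLoop, if_neg (by omega)]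
            norm_num
            congr 1
            push_cast [hk]
            ring_nf
          · rw [PySem.List.pyRange_one_cons (by omega), List.foldl_cons,
              stepA_break xs ((a : Int)) ((k : Int) + 1) ((a : Int)) ((a : Int) + 1 + (k : Int)) (hstop hlt)] at hs
            refine ih xs (altScan xs (a + 1)) (a : Int) ((k : Int) + 1)
              (PySem.List.slice xs (some (a : Int)) (some ((altScan xs (a + 1)) : Int)))
              hjle (by omega) (by omega) (by omega) ?_ hlenrun s ?_
            · congr 2
              push_cast [hk]
              ring_nf
            · rw [hs]
              congr 2
              · push_cast [hk]; ring_nf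
              · push_cast [hk]; ring_nf
        · rw [if_neg hbest] at hs
          have hb' : (if b.length < altScan xs (a + 1) - a
                then PySem.List.slice xs (some (a : Int)) (some ((altScan xs (a + 1)) : Int)) else b) = b := by
            rw [if_neg (by omega)]
          rw [hb']
          rcases Nat.eq_or_lt_of_le hjle with heq | hlt
          · rw [show (a : Int) + 1 + (k : Int) = ((xs.length : Nat) : Int) by push_cast [← heq, hk]; ring,
              PySem.List.pyRange_one_eq_nil (by omega), List.foldl_nil] at hs
            subst hs
            rw [altLoop, if_neg (by omega)]
            exact hb.symm
          · rw [PySem.List.pyRange_one_cons (by omega), List.foldl_cons,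
              stepA_break xs mb ml ((a : Int)) ((a : Int) + 1 + (k : Int)) (hstop hlt)] at hs
            refine ih xs (altScan xs (a + 1)) mb ml b hjle (by omega) h0 h1 hb hl s ?_
            rw [hs]
            congr 2
            · push_cast [hk]; ring_nf
            · push_cast [hk]; ring_nf
      · have haeq : a = xs.length := by omega
        rw [PySem.List.pyRange_one_eq_nil (by omega), List.foldl_nil] at hs
        subst hs
        rw [altLoop, if_neg (by omega)]
        exact hb.symm

theorem slice01_length (xs : List Int) (h : xs ≠ []) :
    (PySem.List.slice xs (some 0) (some 1)).length = 1 := by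
  have hlen : 0 < xs.length := List.length_pos_iff.mpr h
  rw [show ((0 : Int)) = ((0 : Nat) : Int) by norm_num,
    show ((1 : Int)) = ((1 : Nat) : Int) by norm_num,
    PySem.List.length_slice, PySem.List.clampIdx_natCast, PySem.List.clampIdx_natCast]
  omega

-- B's first iteration ignores the dummy initial best: [] and xs[0:1] lead to the same state
theorem altLoop_start (xs : List Int) (h : xs ≠ []) :
    altLoop xs 0 [] = altLoop xs 0 (PySem.List.slice xs (some 0) (some 1)) := by
  have hlen : 0 < xs.length := List.length_pos_iff.mpr h
  have hj := altScan_ge xs 1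
  have hlen1 := slice01_length xs h
  conv_lhs => rw [altLoop]
  conv_rhs => rw [altLoop]
  rw [if_pos hlen, if_pos hlen]
  show altLoop xs (altScan xs (0 + 1))
        (if ([] : List Int).length < altScan xs (0 + 1) - 0
          then PySem.List.slice xs (some ((0 : Nat) : Int)) (some ((altScan xs (0 + 1)) : Int)) else [])
      = altLoop xs (altScan xs (0 + 1))
        (if (PySem.List.slice xs (some 0) (some 1)).length < altScan xs (0 + 1) - 0
          then PySem.List.slice xs (some ((0 : Nat) : Int)) (some ((altScan xs (0 + 1)) : Int))
          else PySem.List.slice xs (some 0) (some 1))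
  simp only [Nat.zero_add, Nat.sub_zero, List.length_nil]
  rcases Nat.eq_or_lt_of_le hj with heq | hlt
  · rw [if_pos (by omega), if_neg (by omega)]
    norm_num [← heq]
  · rw [if_pos (by omega), if_pos (by omega)]

-- ===== VERDICT (by name: the statement is the Claim_ definition above) =====
theorem rango_contiguo_mayor_py_spec : Claim_equal_rango_contiguo_mayor_py := by
  intro xs _
  unfold Spec_rango_contiguo_mayor_py rango_contiguo_mayor_py rango_contiguo_mayor_py_alt
  by_cases hx : xs = []
  · subst hx
    rw [if_pos rfl, altLoop, if_neg (by simp)]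
  · rw [if_neg hx, altLoop_start xs hx]
    have h := main_align xs.length xs 0 0 1 (PySem.List.slice xs (some 0) (some 1))
      (Nat.zero_le _) (by omega) le_rfl le_rfl (by norm_num)
      (by rw [slice01_length xs hx]; norm_num) _ rfl
    push_cast at h
    norm_num at h
    exact h
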